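-- pv_equiv track=rewrite | github.com/pgarrett-scripps/peptacular | src/peptacular/util.py | _pop_ion_count
-- ===== SOURCE A (Python) =====
-- from typing import Union, List, Tuple, Dict, Generator, Optional
-- from typing import Callable, Dict, List, Optional, Tuple, Union
--
-- def _pop_ion_count(ion: str) -> Tuple[int, str]:
--     """
--     Parse the charge of an ion from a string.
--
--     :param ion: The ion string to parse.
--     :type ion: str
--
--     :return: A tuple containing the charge and the remaining ion string.
--     :rtype: Tuple[int, str]
--
--     .. code-block:: python
--
--         >>> _pop_ion_count('+H+')
--         (1, 'H+')
--
--         >>> _pop_ion_count('+2Na+')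
--         (2, 'Na+')
--
--         >>> _pop_ion_count('2I-')
--         (2, 'I-')
--
--         >>> _pop_ion_count('+e-')
--         (1, 'e-')
--
--         >>> _pop_ion_count('-2Na+')
--         (-2, 'Na+')
--
--         >>> _pop_ion_count('+2Mg2+')
--         (2, 'Mg2+')
--
--     """
--
--     count_str = ""
--
--     charge = 1
--     for i, c in enumerate(ion):
--         if c == "-":
--             charge = -1
--         elif c == "+":
--             pass
--         elif c.isdigit():
--             count_str += c
--         else:
--             cnt = int(count_str) if count_str else 1
--             return cnt * charge, ion[i:]
--
--     raise ValueError(f"Bad Ion Count: {ion}")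
-- ===== SOURCE B (Python) =====
-- def _split_prefix(s):
--     """Recursively peel one leading char; results (saw_minus, digits, rest) are
--     assembled on the way back up the recursion."""
--     if not s:
--         raise ValueError(f"Bad Ion Count: {s}")
--     c, t = s[0], s[1:]
--     if c == '-':
--         _, ds, rest = _split_prefix(t)
--         return True, ds, rest
--     if c == '+':
--         return _split_prefix(t)
--     if c.isdigit():
--         neg, ds, rest = _split_prefix(t)
--         return neg, c + ds, rest
--     return False, '', s
--
--
-- def _pop_ion_count(ion: str):
--     neg, digits, rest = _split_prefix(ion)
--     cnt = int(digits) if digits else 1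
--     return (-cnt if neg else cnt), rest
-- ===== Notes on version B (the rewrite author's own statement) =====
-- stated objective: alternative
-- what changed: Replaces A's iterative fused scan (mutating count_str and charge while enumerating, returning from inside the loop) by a structural recursion that peels one character per call and assembles (saw_minus flag, digit string, remainder) on the way back up, with the digits consed during unwinding and the failure case at the empty-string base case.
import Mathlib
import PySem

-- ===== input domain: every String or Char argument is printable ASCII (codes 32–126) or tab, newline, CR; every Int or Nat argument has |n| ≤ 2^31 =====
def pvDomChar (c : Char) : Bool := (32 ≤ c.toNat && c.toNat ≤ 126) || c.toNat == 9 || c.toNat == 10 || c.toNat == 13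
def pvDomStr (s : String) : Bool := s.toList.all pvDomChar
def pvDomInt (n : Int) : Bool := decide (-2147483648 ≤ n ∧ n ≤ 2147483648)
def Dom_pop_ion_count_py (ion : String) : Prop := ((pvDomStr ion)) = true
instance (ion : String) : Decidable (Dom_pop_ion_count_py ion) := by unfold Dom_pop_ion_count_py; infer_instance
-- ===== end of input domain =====

-- B replaces A's iterative fused scan by a structural recursion that peels one character per
-- call and assembles (sign flag, digits, remainder) during unwinding; objective: alternative.

-- ===== PORT A =====
-- A's loop over (i, c) in enumerate(ion), mutating count_str and charge; returns none where the
-- Python raises ValueError (the loop runs off the end of the string).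
def popIonLoopA : List Char → List Char → Int → Option (Int × String)
  | [], _, _ => none
  | c :: cs, countStr, charge =>
    if c = '-' then popIonLoopA cs countStr (-1)
    else if c = '+' then popIonLoopA cs countStr charge
    else if PySem.Chars.isdigit c then popIonLoopA cs (countStr ++ [c]) charge
    else
      -- cnt = int(count_str) if count_str else 1
      let cnt : Int := if countStr = [] then 1 else (PySem.Int.ofStr? (String.mk countStr)).getD 0
      some (cnt * charge, String.mk (c :: cs))   -- ion[i:] is the current suffix

def pop_ion_count_py (ion : String) : Int × String :=
  (popIonLoopA ion.toList [] 1).getD (0, "")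

-- ===== PORT B =====
-- _split_prefix: peel one char per call, combine the recursive result on the way back up;
-- none = the ValueError at the empty-string base case.
def popIonSplitB : List Char → Option (Bool × List Char × List Char)
  | [] => none
  | c :: t =>
    if c = '-' then (popIonSplitB t).map (fun r => (true, r.2.1, r.2.2))
    else if c = '+' then popIonSplitB t
    else if PySem.Chars.isdigit c then (popIonSplitB t).map (fun r => (r.1, c :: r.2.1, r.2.2))
    else some (false, [], c :: t)

def pop_ion_count_py_alt (ion : String) : Int × String :=
  match popIonSplitB ion.toList with
  | none => (0, "")   -- Python B raises ValueError here (outside Pre_)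
  | some (neg, ds, rest) =>
    -- cnt = int(digits) if digits else 1
    let cnt : Int := if ds = [] then 1 else (PySem.Int.ofStr? (String.mk ds)).getD 0
    ((if neg then -cnt else cnt), String.mk rest)

-- ===== PRECONDITION & SPEC =====
-- Pre_ excludes exactly the inputs where A raises ValueError: strings (the empty string among
-- them) consisting entirely of sign and digit characters, so the scan never reaches a
-- non-prefix character.
def Pre_pop_ion_count_py (ion : String) : Prop :=
  ion.toList.all (fun c => c = '+' || c = '-' || PySem.Chars.isdigit c) = false
instance (ion : String) : Decidable (Pre_pop_ion_count_py ion) := by unfold Pre_pop_ion_count_py; infer_instance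
def pvWitness_pop_ion_count_py : String := "H"

def Spec_pop_ion_count_py (ion : String) (out : Int × String) : Prop := out = pop_ion_count_py_alt ion
instance (ion : String) (out : Int × String) : Decidable (Spec_pop_ion_count_py ion out) := by unfold Spec_pop_ion_count_py; infer_instance

-- ===== CLAIM (what is proved, stated in full; the proofs are below) =====
def Claim_equal_pop_ion_count_py : Prop := ∀ (ion : String), Dom_pop_ion_count_py ion → Pre_pop_ion_count_py ion → Spec_pop_ion_count_py ion (pop_ion_count_py ion)

-- ===== LEMMAS AND PROOFS =====
-- The count A would report for a finished digit accumulator.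
def pvCntVal (l : List Char) : Int :=
  if l = [] then 1 else (PySem.Int.ofStr? (String.mk l)).getD 0

-- A's loop, run with accumulator `acc` and current charge, agrees with B's recursive split.
lemma popIonLoopA_eq_split (cs : List Char) :
    ∀ (acc : List Char) (charge : Int) (neg : Bool) (ds rest : List Char),
    popIonSplitB cs = some (neg, ds, rest) →
    popIonLoopA cs acc charge =
      some (pvCntVal (acc ++ ds) * (if neg then -1 else charge), String.mk rest) := by
  induction cs with
  | nil => intro acc charge neg ds rest h; simp [popIonSplitB] at h
  | cons c t ih =>
    intro acc charge neg ds rest h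
    by_cases hm : c = '-'
    · subst hm
      cases hr : popIonSplitB t with
      | none => simp [popIonSplitB, hr] at h
      | some r =>
        obtain ⟨neg', ds', rest'⟩ := r
        simp [popIonSplitB, hr] at h
        obtain ⟨h1, h2, h3⟩ := h
        subst h1; subst h2; subst h3
        simp only [popIonLoopA, if_pos rfl]
        rw [ih acc (-1) neg' ds' rest' hr]
        simp
    · by_cases hp : c = '+'
      · subst hp
        simp [popIonSplitB] at h
        simp only [popIonLoopA, if_neg (by decide : ('+' : Char) ≠ '-'), if_pos rfl]
        exact ih acc charge neg ds rest h
      · by_cases hd : PySem.Chars.isdigit c = true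
        · cases hr : popIonSplitB t with
          | none => simp [popIonSplitB, hm, hp, hd, hr] at h
          | some r =>
            obtain ⟨neg', ds', rest'⟩ := r
            simp [popIonSplitB, hm, hp, hd, hr] at h
            obtain ⟨h1, h2, h3⟩ := h
            subst h1; subst h2; subst h3
            simp only [popIonLoopA, if_neg hm, if_neg hp, if_pos hd]
            rw [ih (acc ++ [c]) charge neg' ds' rest' hr]
            simp
        · have hd' : PySem.Chars.isdigit c = false := by simpa using hd
          simp [popIonSplitB, hm, hp, hd'] at h
          obtain ⟨h1, h2, h3⟩ := h
          subst h1; subst h2; subst h3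
          simp [popIonLoopA, hm, hp, hd', pvCntVal]

-- On every input admitted by Pre_, B's recursion reaches its non-prefix base case.
lemma popIonSplitB_isSome (cs : List Char)
    (h : cs.all (fun c => c = '+' || c = '-' || PySem.Chars.isdigit c) = false) :
    (popIonSplitB cs).isSome := by
  induction cs with
  | nil => simp at h
  | cons c t ih =>
    simp only [List.all_cons, Bool.and_eq_false_iff] at h
    by_cases hm : c = '-'
    · rcases h with h | h
      · subst hm; simp at h
      · subst hm; simpa [popIonSplitB] using ih h
    · by_cases hp : c = '+'
      · rcases h with h | h
        · subst hp; simp at h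
        · subst hp; simpa [popIonSplitB] using ih h
      · by_cases hd : PySem.Chars.isdigit c = true
        · rcases h with h | h
          · simp [hm, hp, hd] at h
          · simpa [popIonSplitB, hm, hp, hd] using ih h
        · have hd' : PySem.Chars.isdigit c = false := by simpa using hd
          simp [popIonSplitB, hm, hp, hd']

-- ===== VERDICT (by name: the statement is the Claim_ definition above) =====
theorem pop_ion_count_py_spec : Claim_equal_pop_ion_count_py := by
  intro ion _ hpre
  unfold Spec_pop_ion_count_py pop_ion_count_py pop_ion_count_py_alt
  obtain ⟨⟨neg, ds, rest⟩, hsome⟩ :=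
    Option.isSome_iff_exists.mp (popIonSplitB_isSome ion.toList hpre)
  rw [popIonLoopA_eq_split ion.toList [] 1 neg ds rest hsome, hsome]
  simp only [List.nil_append, Option.getD_some, pvCntVal]
  cases neg
  · simp [mul_comm]
  · split_ifs <;> simp [mul_comm]
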